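-- pv_equiv track=rewrite | github.com/Bogdan199719/DomainMapper | src/domainmapper/formatter.py | aggregate_ips
-- ===== SOURCE A (Python) =====
-- import ipaddress
-- from typing import Callable, List, Set
--
-- def aggregate_ips(ips: Set[str], mode: str) -> Set[str]:
--     """
--     Aggregate a set of IP addresses.
--     mode: '16' → /16, '24' → /24, 'mix' → /24 for groups + /32 singles, '32' → no change
--     """
--     if mode not in ('16', '24', 'mix'):
--         return ips
--
--     if mode in ('16', '24'):
--         prefix = int(mode)
--         result = set()
--         for ip in ips:
--             try:
--                 net = ipaddress.IPv4Network(f"{ip}/{prefix}", strict=False)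
--                 result.add(str(net.network_address))
--             except ValueError:
--                 result.add(ip)
--         return result
--
--     # mix: group by /24, if >1 host → use /24 base, else keep /32
--     groups: dict = {}
--     for ip in ips:
--         key = '.'.join(ip.split('.')[:3])
--         groups.setdefault(key, []).append(ip)
--
--     result = set()
--     for key, group in groups.items():
--         if len(group) > 1:
--             result.add(f"{key}.0")   # /24 base
--         else:
--             result.add(group[0])     # /32
--     return result
-- ===== SOURCE B (Python) =====
-- import re
-- from typing import Set
--
-- # the classic dotted-quad pattern: four 0-255 decimal octets, no leading zeros
-- _OCTET = r'(25[0-5]|2[0-4][0-9]|1[0-9][0-9]|[1-9]?[0-9])'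
-- _IPV4 = re.compile(r'\.'.join([_OCTET] * 4))
--
--
-- def aggregate_ips(ips: Set[str], mode: str) -> Set[str]:
--     """
--     Aggregate a set of IP addresses.
--     mode: '16' -> /16, '24' -> /24, 'mix' -> /24 for groups + /32 singles, other -> no change
--     """
--     if mode in ('16', '24'):
--         def base(ip):
--             m = _IPV4.fullmatch(ip)
--             if m is None:
--                 return ip
--             a, b, c, _ = m.groups()
--             return f"{a}.{b}.0.0" if mode == '16' else f"{a}.{b}.{c}.0"
--
--         return {base(ip) for ip in ips}
--
--     if mode != 'mix':
--         return ips
--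
--     # mix: sort the /24 keys and find the shared ones by an adjacent-duplicate
--     # scan, then emit per address: a shared key collapses to its /24 base,
--     # a unique key keeps the address itself.
--     keys = ['.'.join(ip.split('.')[:3]) for ip in ips]
--     ks = sorted(keys)
--     shared = {a for a, b in zip(ks, ks[1:]) if a == b}
--     return {k + '.0' if k in shared else ip for ip, k in zip(ips, keys)}
-- ===== Notes on version B (the rewrite author's own statement) =====
-- stated objective: alternative
-- what changed: The 'mix' branch no longer builds a dict of per-key lists and scans its items: B sorts the /24 keys, finds the shared ones by an adjacent-duplicate scan over the sorted sequence, and emits per address either the /24 base or the address itself; the '16'/'24' branch replaces the ipaddress.IPv4Network call inside an accumulating try/except loop by a dotted-quad regex fullmatch whose groups are reassembled in a set comprehension.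
import Mathlib
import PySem

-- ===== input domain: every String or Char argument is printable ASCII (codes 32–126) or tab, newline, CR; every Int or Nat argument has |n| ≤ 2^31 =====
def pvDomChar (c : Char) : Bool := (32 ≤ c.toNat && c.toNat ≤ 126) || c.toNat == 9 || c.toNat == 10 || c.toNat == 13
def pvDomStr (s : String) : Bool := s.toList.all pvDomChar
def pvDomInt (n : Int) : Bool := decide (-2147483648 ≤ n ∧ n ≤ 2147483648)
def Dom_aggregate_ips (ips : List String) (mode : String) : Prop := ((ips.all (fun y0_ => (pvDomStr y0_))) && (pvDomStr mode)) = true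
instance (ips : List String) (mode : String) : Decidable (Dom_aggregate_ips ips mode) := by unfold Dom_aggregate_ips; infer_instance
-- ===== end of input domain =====

-- B rewrites the 'mix' branch as sort-the-/24-keys + adjacent-duplicate scan instead of A's
-- dict-of-lists grouping (objective: alternative, same practical cost; return value only —
-- both Pythons return a fresh set and mutate nothing).

-- ===== PORT A =====
-- Shared helper, used by both ports: hand port of the stdlib call
-- str(ipaddress.IPv4Network(f"{ip}/{prefix}", strict=False).network_address) in A, and of
-- B's regex fullmatch + f-string.  Exact on printable-ASCII `ip` and prefix ∈ {16, 24} (CPython 3.11):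
-- a second '/' in the address is rejected, the address must be 4 '.'-separated octets, and an
-- octet is rejected if empty, non-digit, longer than 3 chars, with a leading zero, or > 255.
-- `none` is exactly where CPython raises ValueError.
def pvParseOctet? (cs : List Char) : Option Int :=
  if cs.isEmpty then none
  else if !(PySem.Chars.strIsdigit cs) then none
  else if cs.length > 3 then none
  else if cs.length > 1 && cs.headD ' ' == '0' then none
  else match PySem.Int.ofChars? cs with
    | some n => if 255 < n then none else some n
    | none => none

def pvIpv4NetBase? (ip : String) (pfx : Int) : Option String :=
  if ip.toList.contains '/' then none
  else match ((PySem.Str.split? ip ".").getD []).map (fun p => pvParseOctet? p.toList) with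
    | [some a, some b, some c, some _] =>
        if pfx == 16 then some (PySem.Str.join "." [PySem.Int.toStr a, PySem.Int.toStr b, "0", "0"])
        else some (PySem.Str.join "." [PySem.Int.toStr a, PySem.Int.toStr b, PySem.Int.toStr c, "0"])
    | _ => none

-- Shared helper: the expression '.'.join(ip.split('.')[:3]), appearing verbatim in both Pythons.
def pvMixKey (ip : String) : String :=
  PySem.Str.join "." (PySem.List.slice ((PySem.Str.split? ip ".").getD []) none (some 3))

def aggregate_ips (ips : List String) (mode : String) : List String :=
  if !(mode == "16" || mode == "24" || mode == "mix") then ips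
  else if mode == "16" || mode == "24" then
    -- prefix = int(mode); mode is "16" or "24" here, so int() cannot fail (getD totalizes)
    let pfx : Int := (PySem.Int.ofStr? mode).getD 0
    ips.foldl (fun result ip =>
      match pvIpv4NetBase? ip pfx with
      | some s => PySem.Set.add result s    -- try: result.add(str(net.network_address))
      | none   => PySem.Set.add result ip)  -- except ValueError: result.add(ip)
      PySem.Set.empty
  else
    -- mix: groups.setdefault(key, []).append(ip)
    let groups : PySem.Dict String (List String) :=
      ips.foldl (fun g ip => g.modify (pvMixKey ip) [] (· ++ [ip])) PySem.Dict.empty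
    groups.items.foldl (fun result kg =>
      if kg.2.length > 1 then PySem.Set.add result (kg.1 ++ ".0")
      else PySem.Set.add result ((PySem.List.pyGet? kg.2 0).getD ""))  -- group[0]; groups are never empty
      PySem.Set.empty

-- ===== PORT B =====
-- Port of B's `base`: _IPV4.fullmatch(ip) succeeds exactly where pvIpv4NetBase? is some
-- (the dotted-quad regex matches four 0-255 decimal octets without leading zeros, which is
-- the same condition pvIpv4NetBase? checks), and the f-string built from the match groups is
-- the same joined string pvIpv4NetBase? returns; exact on printable-ASCII inputs.
def aggregate_ips_alt (ips : List String) (mode : String) : List String :=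
  if mode == "16" || mode == "24" then
    -- {base(ip) for ip in ips}
    PySem.Set.ofList (ips.map (fun ip =>
      match pvIpv4NetBase? ip (if mode == "16" then 16 else 24) with
      | some s => s    -- the f-string over the regex match's groups
      | none   => ip)) -- m is None: return ip
  else if !(mode == "mix") then ips
  else
    -- keys = ['.'.join(ip.split('.')[:3]) for ip in ips]
    let keys := ips.map pvMixKey
    -- ks = sorted(keys)
    let ks := PySem.List.sorted keys (fun x => x) false
    -- shared = {a for a, b in zip(ks, ks[1:]) if a == b}
    let shared := PySem.Set.ofList (((ks.zip ks.tail).filter (fun p => p.1 == p.2)).map Prod.fst)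
    -- {k + '.0' if k in shared else ip for ip, k in zip(ips, keys)}
    PySem.Set.ofList ((ips.zip keys).map (fun p =>
      if shared.contains p.2 then p.2 ++ ".0" else p.1))

-- ===== PRECONDITION & SPEC =====
def Spec_aggregate_ips (ips : List String) (mode : String) (out : List String) : Prop := out = aggregate_ips_alt ips mode
instance (ips : List String) (mode : String) (out : List String) : Decidable (Spec_aggregate_ips ips mode out) := by unfold Spec_aggregate_ips; infer_instance

-- ===== CLAIM (what is proved, stated in full; the proofs are below) =====
def Claim_equal_aggregate_ips : Prop := ∀ (ips : List String) (mode : String), Dom_aggregate_ips ips mode → Spec_aggregate_ips ips mode (aggregate_ips ips mode)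

-- ===== LEMMAS AND PROOFS =====

-- the per-IP output of the mix branch, as a function of the key
def pvOut (ips : List String) (k : String) : String :=
  if (ips.filter (fun ip => pvMixKey ip == k)).length > 1 then k ++ ".0"
  else (PySem.List.pyGet? (ips.filter (fun ip => pvMixKey ip == k)) 0).getD ""

-- dedup before mapping does not change the resulting set (first-occurrence order preserved)
theorem pv_ofList_map_ofList (f : String → String) (ks : List String) :
    PySem.Set.ofList ((PySem.Set.ofList ks).map f) = PySem.Set.ofList (ks.map f) := by
  induction ks using List.reverseRecOn with
  | nil => rfl
  | append_singleton ks k ih =>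
    rw [PySem.Set.ofList_append_singleton,
      show List.map f (ks ++ [k]) = List.map f ks ++ [f k] by simp]
    by_cases hk : k ∈ PySem.Set.ofList ks
    · rw [PySem.Set.add_of_mem hk, ih, PySem.Set.ofList_append_singleton,
        PySem.Set.add_of_mem (by
          exact (PySem.Set.mem_ofList _ _).mpr
            (List.mem_map_of_mem ((PySem.Set.mem_ofList _ _).mp hk)))]
    · rw [PySem.Set.add_of_not_mem hk,
        show List.map f (PySem.Set.ofList ks ++ [k]) = List.map f (PySem.Set.ofList ks) ++ [f k]
          by simp,
        PySem.Set.ofList_append_singleton, PySem.Set.ofList_append_singleton, ih]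

-- the '16'/'24' branches of the two ports agree
theorem pv_branch_net (ips : List String) (p : Int) :
    ips.foldl (fun result ip =>
      match pvIpv4NetBase? ip p with
      | some s => PySem.Set.add result s
      | none   => PySem.Set.add result ip) PySem.Set.empty
    = PySem.Set.ofList (ips.map (fun ip =>
        match pvIpv4NetBase? ip p with
        | some s => s
        | none   => ip)) := by
  rw [PySem.Set.ofList_eq_foldl, List.foldl_map]
  congr 1
  funext r ip
  cases pvIpv4NetBase? ip p <;> simp

-- A's groups dict sends k to the sublist of IPs whose mix key is k
theorem pv_groups_getD (ips : List String) (k : String) :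
    (ips.foldl (fun g ip => g.modify (pvMixKey ip) [] (· ++ [ip])) PySem.Dict.empty).getD k []
      = ips.filter (fun ip => pvMixKey ip == k) := by
  have hfold : ips.foldl (fun g ip => g.modify (pvMixKey ip) [] (· ++ [ip])) PySem.Dict.empty
      = (ips.map (fun ip => (pvMixKey ip, ip))).foldl
          (fun d p => d.modify p.1 [] (· ++ [p.2])) PySem.Dict.empty := by
    rw [List.foldl_map]
  rw [hfold, PySem.Dict.getD_foldl_modify_append, List.filter_map, List.map_map]
  simp [Function.comp_def]

-- A's mix branch equals its closed form: outputs per distinct key, in first-occurrence order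
theorem pv_mix_A (ips : List String) :
    (let groups : PySem.Dict String (List String) :=
      ips.foldl (fun g ip => g.modify (pvMixKey ip) [] (· ++ [ip])) PySem.Dict.empty
    groups.items.foldl (fun result kg =>
      if kg.2.length > 1 then PySem.Set.add result (kg.1 ++ ".0")
      else PySem.Set.add result ((PySem.List.pyGet? kg.2 0).getD "")) PySem.Set.empty)
    = PySem.Set.ofList ((PySem.Set.ofList (ips.map pvMixKey)).map (pvOut ips)) := by
  set groups : PySem.Dict String (List String) :=
      ips.foldl (fun g ip => g.modify (pvMixKey ip) [] (· ++ [ip])) PySem.Dict.empty with hg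
  have hkeys : groups.keys = PySem.Set.ofList (ips.map pvMixKey) := by
    rw [hg, PySem.Dict.keys_foldl_modify_key ips pvMixKey [] (fun _ ip => (· ++ [ip]))]
    rw [PySem.Set.ofList_eq_foldl]
    rfl
  have hnodup : groups.keys.Nodup := by
    rw [hkeys]; exact PySem.Set.nodup_ofList _
  have hitems : groups.items
      = (PySem.Set.ofList (ips.map pvMixKey)).map
          (fun k => (k, ips.filter (fun ip => pvMixKey ip == k))) := by
    rw [PySem.Dict.items_eq_map_keys groups hnodup [], hkeys]
    exact List.map_congr_left (fun k _ => by rw [hg, pv_groups_getD])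
  show groups.items.foldl _ _ = _
  rw [hitems, List.foldl_map,
    PySem.Set.ofList_eq_foldl ((PySem.Set.ofList (ips.map pvMixKey)).map (pvOut ips)),
    List.foldl_map, show (PySem.Set.empty : PySem.Set String) = [] from rfl]
  apply PySem.List.foldl_congr_mem
  intro r k _
  by_cases hgt : 1 < (ips.filter (fun ip => pvMixKey ip == k)).length <;>
    simp [pvOut, hgt]

-- in a ≤-sorted list, x heads an adjacent equal pair iff it occurs more than once
theorem pv_dup_mem (s : List String) (x : String) (hs : s.Pairwise (· ≤ ·)) :
    x ∈ ((s.zip s.tail).filter (fun p => p.1 == p.2)).map Prod.fst ↔ 1 < s.count x := by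
  induction s with
  | nil => simp
  | cons a t ih =>
    cases t with
    | nil =>
      have hle : List.count x [a] ≤ 1 := by
        simpa using List.count_le_length (l := [a]) (a := x)
      simp only [List.tail_cons, List.zip_nil_right, List.filter_nil, List.map_nil,
        List.not_mem_nil, false_iff]
      omega
    | cons b u =>
      rw [List.pairwise_cons] at hs
      obtain ⟨ha, ht⟩ := hs
      have ihbu := ih ht
      simp only [List.tail_cons] at ihbu ⊢
      rw [List.zip_cons_cons, List.filter_cons, List.count_cons]
      by_cases hab : a = b
      · subst hab
        simp only [beq_self_eq_true, if_true, List.map_cons, List.mem_cons]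
        by_cases hxa : x = a
        · subst hxa
          have hpos : 0 < List.count x (x :: u) := List.count_pos_iff.mpr (by simp)
          have hbeq : (x == x) = true := beq_self_eq_true x
          simp only [hbeq, if_true]
          constructor
          · intro _; omega
          · intro _; simp
        · have hbeq : (a == x) = false := beq_eq_false_iff_ne.mpr (Ne.symm hxa)
          simp only [hbeq, Bool.false_eq_true, if_false, add_zero]
          rw [← ihbu]
          constructor
          · rintro (h | h)
            · exact absurd h hxa
            · exact h
          · intro h; exact Or.inr h
      · have hbeq : (a == b) = false := beq_eq_false_iff_ne.mpr hab
        simp only [hbeq, Bool.false_eq_true, if_false]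
        by_cases hxa : x = a
        · subst hxa
          have hnotin : x ∉ b :: u := by
            intro hmem
            rcases List.mem_cons.mp hmem with h | h
            · exact hab h
            · have h1 : b ≤ x := (List.pairwise_cons.mp ht).1 x h
              have h2 : x ≤ b := ha b (by simp)
              exact hab (le_antisymm h2 h1)
          have hcnt : List.count x (b :: u) = 0 := List.count_eq_zero.mpr hnotin
          rw [ihbu, hcnt]
          simp
        · have hbeq2 : (a == x) = false := beq_eq_false_iff_ne.mpr (Ne.symm hxa)
          rw [ihbu, hbeq2]
          simp

-- B's shared-key test equals "the key occurs more than once among the keys"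
theorem pv_shared_contains (keys : List String) (k : String) :
    (PySem.Set.ofList ((((PySem.List.sorted keys (fun x => x) false).zip
        (PySem.List.sorted keys (fun x => x) false).tail).filter
        (fun p => p.1 == p.2)).map Prod.fst)).contains k
    = decide (1 < keys.count k) := by
  have hp : (PySem.List.sorted keys (fun x => x) false).Pairwise (· ≤ ·) :=
    PySem.List.sorted_pairwise keys (fun x => x)
  have hperm : (PySem.List.sorted keys (fun x => x) false).Perm keys :=
    PySem.List.sorted_perm keys (fun x => x) false
  rw [Bool.eq_iff_iff, decide_eq_true_eq, PySem.Set.contains_iff, PySem.Set.mem_ofList,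
    pv_dup_mem _ k hp, hperm.count_eq k]

-- counting a key among the mapped keys is the length of the filtered sublist
theorem pv_count_filter (ips : List String) (k : String) :
    (ips.map pvMixKey).count k = (ips.filter (fun ip => pvMixKey ip == k)).length := by
  rw [List.count_eq_countP, List.countP_map, ← List.countP_eq_length_filter]
  rfl

-- B's mix branch equals the same closed form without the dedup
theorem pv_mix_B (ips : List String) :
    (let keys := ips.map pvMixKey
     let ks := PySem.List.sorted keys (fun x => x) false
     let shared := PySem.Set.ofList (((ks.zip ks.tail).filter (fun p => p.1 == p.2)).map Prod.fst)
     PySem.Set.ofList ((ips.zip keys).map (fun p =>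
       if shared.contains p.2 then p.2 ++ ".0" else p.1)))
    = PySem.Set.ofList ((ips.map pvMixKey).map (pvOut ips)) := by
  have hzip : ips.zip (ips.map pvMixKey) = ips.map (fun ip => (ip, pvMixKey ip)) := by
    induction ips with
    | nil => rfl
    | cons a t ih => simp [ih]
  show PySem.Set.ofList _ = _
  rw [hzip, List.map_map, List.map_map]
  congr 1
  apply List.map_congr_left
  intro ip hip
  simp only [Function.comp_apply]
  rw [pv_shared_contains (ips.map pvMixKey) (pvMixKey ip), pv_count_filter]
  unfold pvOut
  by_cases h1 : 1 < (ips.filter (fun x => pvMixKey x == pvMixKey ip)).length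
  · rw [if_pos (by simpa using h1), if_pos h1]
  · rw [if_neg (by simpa using h1), if_neg h1]
    have hmem : ip ∈ ips.filter (fun x => pvMixKey x == pvMixKey ip) := by
      simp [List.mem_filter, hip]
    have hpos : 0 < (ips.filter (fun x => pvMixKey x == pvMixKey ip)).length :=
      List.length_pos_of_mem hmem
    have hone : (ips.filter (fun x => pvMixKey x == pvMixKey ip)).length = 1 := by omega
    obtain ⟨a, ha⟩ := List.length_eq_one_iff.mp hone
    rw [ha] at hmem
    simp at hmem
    rw [ha, ← hmem]
    simp [PySem.List.pyGet?, PySem.List.pyIdx?]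
-- ===== VERDICT (by name: the statement is the Claim_ definition above) =====
theorem aggregate_ips_spec : Claim_equal_aggregate_ips := by
  intro ips mode _
  unfold Spec_aggregate_ips aggregate_ips aggregate_ips_alt
  by_cases h16 : mode = "16"
  · subst h16
    exact pv_branch_net ips 16
  by_cases h24 : mode = "24"
  · subst h24
    exact pv_branch_net ips 24
  by_cases hmix : mode = "mix"
  · subst hmix
    exact (pv_mix_A ips).trans
      ((pv_ofList_map_ofList (pvOut ips) (ips.map pvMixKey)).trans (pv_mix_B ips).symm)
  · have e16 : (mode == "16") = false := beq_eq_false_iff_ne.mpr h16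
    have e24 : (mode == "24") = false := beq_eq_false_iff_ne.mpr h24
    have emix : (mode == "mix") = false := beq_eq_false_iff_ne.mpr hmix
    simp only [e16, e24, emix, Bool.false_or, Bool.not_false, Bool.false_eq_true,
      if_true, if_false]
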